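-- pv_equiv track=rewrite | github.com/cuckoo711/MaiMaiNotePad_V2 | backend/mainotebook/content/services/toml_parser_service.py | extract_comments
-- ===== SOURCE A (Python) =====
-- from typing import Dict, List, Any, Optional
--
-- def extract_comments(file_content: str) -> Dict[int, str]:
--     """提取注释并关联到配置项
--
--     Args:
--         file_content: TOML 文件内容
--
--     Returns:
--         dict: 注释映射，键为行号（从 1 开始），值为注释内容
--     """
--     comments = {}
--     lines = file_content.split('\n')
--
--     for line_num, line in enumerate(lines, start=1):
--         # 去除首尾空白
--         stripped_line = line.strip()
--
--         # 检查是否是注释行（以 # 开头）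
--         if stripped_line.startswith('#'):
--             # 提取注释内容（去除 # 和空白）
--             comment_text = stripped_line[1:].strip()
--             comments[line_num] = comment_text
--
--         # 检查是否是行内注释
--         elif '#' in line:
--             # 查找 # 的位置（需要排除字符串中的 #）
--             # 简单处理：查找不在引号内的 #
--             in_string = False
--             escape_next = False
--
--             for i, char in enumerate(line):
--                 if escape_next:
--                     escape_next = False
--                     continue
--
--                 if char == '\\':
--                     escape_next = True
--                     continue
--
--                 if char == '"':
--                     in_string = not in_string
--                     continue
--
--                 if char == '#' and not in_string:
--                     # 找到行内注释
--                     comment_text = line[i+1:].strip()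
--                     if comment_text:
--                         comments[line_num] = comment_text
--                     break
--
--     return comments
-- ===== SOURCE B (Python) =====
-- def _find_hash(line):
--     """Index of the first '#' outside double quotes, honouring backslash
--     escapes, computed by staged string builtins instead of a character scan:
--     split the line on backslashes (each separator escapes the char after it),
--     and inside each escape-free piece jump between '#' occurrences with
--     str.find, deciding quoted-ness by the parity of str.count('"') up to it."""
--     in_string = False
--     base = 0
--     skip = False  # first char of the current piece is escaped
--     for k, piece in enumerate(line.split('\\')):
--         if k:
--             base += 1  # the separator backslash
--         if skip and not piece:
--             # the escape consumed the next backslash separator itself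
--             skip = False
--             continue
--         start = base + 1 if skip else base
--         eff = piece[1:] if skip else piece
--         h = eff.find('#')
--         while h >= 0:
--             if (in_string + eff.count('"', 0, h)) % 2 == 0:
--                 return start + h
--             h = eff.find('#', h + 1)
--         in_string ^= eff.count('"') % 2 == 1
--         base += len(piece)
--         skip = True
--     return None
--
--
-- def _comment_of(line):
--     stripped = line.strip()
--     if stripped.startswith('#'):
--         return stripped[1:].strip()
--     i = _find_hash(line)
--     if i is None:
--         return None
--     text = line[i + 1:].strip()
--     return text if text else None
--
--
-- def extract_comments(file_content: str):
--     return {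
--         n: c
--         for n, line in enumerate(file_content.split('\n'), start=1)
--         if (c := _comment_of(line)) is not None
--     }
-- ===== Notes on version B (the rewrite author's own statement) =====
-- stated objective: alternative
-- what changed: Replaces A's per-character escape_next/in_string state machine with staged string-builtin passes: the line is split on backslashes (each separator escapes the following char), and within each escape-free piece the scan jumps directly between '#' occurrences via str.find, deciding quoted-ness by the parity of str.count('"') of the prefix; the comment is then emitted by a per-line Option helper and one dict comprehension.
import Mathlib
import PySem

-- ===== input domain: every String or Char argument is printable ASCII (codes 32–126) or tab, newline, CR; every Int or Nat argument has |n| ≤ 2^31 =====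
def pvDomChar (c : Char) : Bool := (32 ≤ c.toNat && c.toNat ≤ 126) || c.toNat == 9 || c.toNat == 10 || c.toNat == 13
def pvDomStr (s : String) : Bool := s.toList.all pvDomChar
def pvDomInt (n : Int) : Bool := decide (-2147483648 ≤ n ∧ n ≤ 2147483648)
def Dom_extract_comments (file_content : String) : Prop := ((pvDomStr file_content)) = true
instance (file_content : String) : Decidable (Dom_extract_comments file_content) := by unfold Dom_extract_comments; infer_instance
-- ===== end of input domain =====

-- B replaces A's per-character escape/in-string state machine by staged string builtins:
-- split on backslashes (each separator escapes the next char) and, per escape-free piece,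
-- jump between '#' occurrences with find, deciding quoted-ness by quote-count parity;
-- same practical cost, a genuinely different traversal.


-- ===== PORT A =====
-- the inner 'for i, char in enumerate(line)' loop with its escape_next / in_string flags,
-- returning the index where Python breaks (i of the first unescaped '#' outside quotes)
def aScan : List Char → Nat → Bool → Bool → Option Nat
  | [], _, _, _ => none
  | c :: rest, i, inStr, esc =>
    if esc then aScan rest (i+1) inStr false
    else if c = '\\' then aScan rest (i+1) inStr true
    else if c = '"' then aScan rest (i+1) (!inStr) esc
    else if c = '#' ∧ inStr = false then some i
    else aScan rest (i+1) inStr esc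

-- one iteration of the outer 'for line_num, line in enumerate(lines, start=1)' loop
def aLine (d : PySem.Dict Int String) (n : Int) (line : List Char) : PySem.Dict Int String :=
  let stripped := PySem.Chars.strip line
  if PySem.Chars.startswith stripped ['#'] then
    d.insert n (String.ofList (PySem.Chars.strip (stripped.drop 1)))
  else if PySem.Chars.isIn ['#'] line then
    match aScan line 0 false false with
    | some i =>
        let t := PySem.Chars.strip (line.drop (i+1))
        if t ≠ [] then d.insert n (String.ofList t) else d
    | none => d
  else d

def extract_comments (file_content : String) : List (Int × String) :=
  let lines := PySem.Chars.splitOn file_content.toList ['\n']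
  ((PySem.List.enumerate lines 1).foldl (fun d p => aLine d p.1 p.2) PySem.Dict.empty).items

-- ===== PORT B =====
-- termination fact for bHashLoop (cited by name in its decreasing_by)
theorem pvFindIdxLt {l : List Char} {k : Nat} (h : l.findIdx? (· = '#') = some k) :
    k < l.length := (List.findIdx?_eq_some_iff_findIdx_eq.mp h).1

-- Source B's inner while over '#' positions: Python's eff.find('#', j) is ported by hand as
-- j + findIdx? on eff.drop j (exact for an in-range start), eff.count('"', 0, h) as
-- List.count '"' on eff.take h (exact for in-range bounds)
def bHashLoop (eff : List Char) (inStr : Bool) (j : Nat) : Option Nat :=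
  match hk : (eff.drop j).findIdx? (· = '#') with
  | none => none
  | some k =>
    if (cond inStr 1 0 + (eff.take (j + k)).count '"') % 2 == 0 then some (j + k)
    else bHashLoop eff inStr (j + k + 1)
termination_by eff.length - j
decreasing_by
  have h := pvFindIdxLt hk
  simp only [List.length_drop] at h
  omega

-- Source B's outer for-loop over line.split('\\') with its in_string / base / skip state
def bParts : List (List Char) → Bool → Bool → Nat → Bool → Option Nat
  | [], _, _, _, _ => none
  | piece :: rest, isFirst, inStr, base0, skip =>
    let base := if isFirst then base0 else base0 + 1
    if skip ∧ piece = [] then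
      bParts rest false inStr base false
    else
      let start := if skip then base + 1 else base
      let eff := if skip then piece.drop 1 else piece
      match bHashLoop eff inStr 0 with
      | some h => some (start + h)
      | none => bParts rest false (inStr ^^ (eff.count '"' % 2 == 1)) (base + piece.length) true

-- Source B's _find_hash
def bFindHash (line : List Char) : Option Nat :=
  bParts (PySem.Chars.splitOn line ['\\']) true false 0 false

-- Source B's _comment_of
def bCommentOf (line : List Char) : Option String :=
  let stripped := PySem.Chars.strip line
  if PySem.Chars.startswith stripped ['#'] then
    some (String.ofList (PySem.Chars.strip (stripped.drop 1)))
  else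
    match bFindHash line with
    | none => none
    | some i =>
        let t := PySem.Chars.strip (line.drop (i+1))
        if t = [] then none else some (String.ofList t)

-- Source B's dict comprehension over enumerate(split('\n'), 1)
def extract_comments_alt (file_content : String) : List (Int × String) :=
  (PySem.List.enumerate (PySem.Chars.splitOn file_content.toList ['\n']) 1).filterMap
    (fun p => (bCommentOf p.2).map (fun c => (p.1, c)))

-- ===== PRECONDITION & SPEC =====
def Spec_extract_comments (file_content : String) (out : List (Int × String)) : Prop := out = extract_comments_alt file_content
instance (file_content : String) (out : List (Int × String)) : Decidable (Spec_extract_comments file_content out) := by unfold Spec_extract_comments; infer_instance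

-- ===== CLAIM (what is proved, stated in full; the proofs are below) =====
def Claim_equal_extract_comments : Prop := ∀ (file_content : String), Dom_extract_comments file_content → Spec_extract_comments file_content (extract_comments file_content)

-- ===== LEMMAS AND PROOFS =====

def pySplitAux : List Char → List Char → List (List Char)
  | [], cur => [cur.reverse]
  | c :: rest, cur => if c = '\\' then cur.reverse :: pySplitAux rest [] else pySplitAux rest (c :: cur)

theorem splitOn_go_eq : ∀ (fuel : Nat) (l cur : List Char) (acc : List (List Char)),
    l.length ≤ fuel →
    PySem.Chars.splitOn.go ['\\'] fuel l cur acc = acc.reverse ++ pySplitAux l cur := by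
  intro fuel
  induction fuel with
  | zero =>
    intro l cur acc h
    have : l = [] := List.eq_nil_of_length_eq_zero (Nat.le_zero.mp h)
    subst this
    simp [PySem.Chars.splitOn.go, pySplitAux]
  | succ n ih =>
    intro l cur acc h
    match l with
    | [] => simp [PySem.Chars.splitOn.go, pySplitAux]
    | c :: rest =>
      simp only [List.length_cons, Nat.succ_le_succ_iff] at h
      rw [PySem.Chars.splitOn.go]
      by_cases hc : c = '\\'
      · subst hc
        simp only [List.isPrefixOf, BEq.rfl, Bool.true_and, List.isPrefixOf_nil_left, if_true]
        show PySem.Chars.splitOn.go ['\\'] n (List.drop 1 ('\\' :: rest)) [] (cur.reverse :: acc) = _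
        rw [List.drop_one, List.tail_cons, ih rest [] _ h]
        simp [pySplitAux]
      · have hpre : List.isPrefixOf ['\\'] (c :: rest) = false := by
          simp [List.isPrefixOf, hc]
          intro hh
          exact absurd hh.symm hc
        rw [hpre]
        simp only [Bool.false_eq_true, if_false]
        rw [ih rest (c :: cur) acc h]
        simp [pySplitAux, hc]

theorem splitOn_bs_eq (l : List Char) :
    PySem.Chars.splitOn l ['\\'] = pySplitAux l [] := by
  rw [PySem.Chars.splitOn, splitOn_go_eq (l.length+1) l [] [] (by omega)]
  simp

def joinBS : List (List Char) → List Char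
  | [] => []
  | [p] => p
  | p :: q :: r => p ++ '\\' :: joinBS (q :: r)

theorem pySplitAux_ne_nil : ∀ (l cur : List Char), pySplitAux l cur ≠ [] := by
  intro l
  induction l with
  | nil => intro cur; simp [pySplitAux]
  | cons c rest ih =>
    intro cur
    by_cases hc : c = '\\' <;> simp [pySplitAux, hc, ih]

theorem joinBS_cons {rest : List (List Char)} (p : List Char) (h : rest ≠ []) :
    joinBS (p :: rest) = p ++ '\\' :: joinBS rest := by
  match rest with
  | [] => exact absurd rfl h
  | q :: r => rfl

theorem join_pySplitAux : ∀ (l cur : List Char), joinBS (pySplitAux l cur) = cur.reverse ++ l := by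
  intro l
  induction l with
  | nil => intro cur; simp [pySplitAux, joinBS]
  | cons c rest ih =>
    intro cur
    by_cases hc : c = '\\'
    · subst hc
      rw [pySplitAux, if_pos rfl, joinBS_cons _ (pySplitAux_ne_nil _ _), ih]
      simp
    · rw [pySplitAux, if_neg hc, ih]
      simp

theorem free_pySplitAux : ∀ (l cur : List Char), '\\' ∉ cur →
    ∀ p ∈ pySplitAux l cur, '\\' ∉ p := by
  intro l
  induction l with
  | nil =>
    intro cur hcur p hp
    simp [pySplitAux] at hp
    subst hp
    simpa using hcur
  | cons c rest ih =>
    intro cur hcur p hp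
    by_cases hc : c = '\\'
    · subst hc
      rw [pySplitAux, if_pos rfl] at hp
      rcases List.mem_cons.mp hp with h | h
      · subst h; simpa using hcur
      · exact ih [] (by simp) p h
    · rw [pySplitAux, if_neg hc] at hp
      exact ih (c :: cur) (by simp [hcur]; exact fun hh => hc hh.symm) p hp

def fh : List Char → Bool → Option Nat
  | [], _ => none
  | c :: cs, inStr =>
    if c = '"' then (fh cs (!inStr)).map (· + 1)
    else if c = '#' ∧ inStr = false then some 0
    else (fh cs inStr).map (· + 1)

def Pb (eff : List Char) (inStr : Bool) (j : Nat) : Bool :=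
  (eff[j]? == some '#') && ((cond inStr 1 0 + (eff.take j).count '"') % 2 == 0)

theorem Pb_succ (c : Char) (cs : List Char) (inStr : Bool) (j : Nat) :
    Pb (c :: cs) inStr (j + 1) = Pb cs (if c = '"' then !inStr else inStr) j := by
  unfold Pb
  simp only [List.getElem?_cons_succ, List.take_succ_cons, List.count_cons]
  by_cases hc : c = '"'
  · subst hc
    simp only [if_pos rfl, if_pos rfl]
    congr 1
    cases inStr <;> simp [Nat.add_mod, Nat.add_comm] <;> omega
  · simp [hc]

theorem Pb_zero (c : Char) (cs : List Char) (inStr : Bool) :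
    Pb (c :: cs) inStr 0 = ((c == '#') && !inStr) := by
  unfold Pb
  cases inStr <;> simp

theorem fh_eq_find : ∀ (eff : List Char) (inStr : Bool),
    fh eff inStr = (List.range eff.length).find? (Pb eff inStr) := by
  intro eff
  induction eff with
  | nil => intro inStr; simp [fh]
  | cons c cs ih =>
    intro inStr
    have hsucc : (Pb (c :: cs) inStr ∘ Nat.succ) = Pb cs (if c = '"' then !inStr else inStr) := by
      funext j
      exact Pb_succ c cs inStr j
    rw [List.length_cons, List.range_succ_eq_map, List.find?_cons, Pb_zero, List.find?_map, hsucc]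
    by_cases hc : c = '"'
    · subst hc
      rw [fh]
      simp only [if_pos rfl, ih]
      have hfalse : (('"' == '#') && !inStr) = false := by cases inStr <;> rfl
      rw [hfalse]
      simp [Nat.succ_eq_add_one]
    · rw [fh, if_neg hc]
      by_cases hh : c = '#' ∧ inStr = false
      · have : ((c == '#') && !inStr) = true := by
          rw [hh.1, hh.2]; rfl
        rw [this, if_pos hh]
      · have hfalse : ((c == '#') && !inStr) = false := by
          cases hx : (c == '#') <;> cases inStr <;> simp_all
        rw [hfalse, if_neg hh, ih, if_neg hc]

theorem bHashLoop_eq_find : ∀ (eff : List Char) (inStr : Bool) (j : Nat),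
    bHashLoop eff inStr j = (List.range' j (eff.length - j)).find? (Pb eff inStr) := by
  intro eff inStr
  intro j
  induction hi : eff.length - j using Nat.strong_induction_on generalizing j with
  | _ n ih =>
  subst hi
  rw [bHashLoop]
  cases hk : (eff.drop j).findIdx? (· = '#') with
  | none =>
    simp only [hk]
    have hnone := List.findIdx?_eq_none_iff.mp hk
    symm
    apply List.find?_eq_none.mpr
    intro m hm
    have hmr := List.mem_range'_1.mp hm
    have hget : eff[m]? = (eff.drop j)[m - j]? := by
      rw [List.getElem?_drop]
      congr 1
      omega
    unfold Pb
    cases hx : eff[m]? with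
    | none => simp [hx]
    | some c =>
      have : c ∈ eff.drop j := by
        have := hx
        rw [hget] at this
        exact List.mem_of_getElem? this
      have hc := hnone c this
      simp at hc
      simp [hx, hc]
  | some k =>
    simp only [hk]
    obtain ⟨hklt, hkget, hkmin⟩ := List.findIdx?_eq_some_iff_getElem.mp hk
    simp only [List.length_drop] at hklt
    simp only [decide_eq_true_eq] at hkget hkmin
    have hgetjk : eff[j + k]? = some '#' := by
      rw [← List.getElem?_drop, List.getElem?_eq_getElem (by simpa using hklt)]
      simp [hkget]
    -- split the range
    have hsplit : List.range' j (eff.length - j) = List.range' j k ++ List.range' (j + k) (eff.length - j - k) := by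
      have h1 : eff.length - j = k + (eff.length - j - k) := by omega
      have h2 := List.range'_append (s := j) (m := k) (n := eff.length - j - k) (step := 1)
      simp only [Nat.one_mul] at h2
      conv_lhs => rw [h1]
      rw [← h2]
    have hfirst : (List.range' j k).find? (Pb eff inStr) = none := by
      apply List.find?_eq_none.mpr
      intro m hm
      have hmr := List.mem_range'_1.mp hm
      have hdlt : m - j < (eff.drop j).length := by
        simp only [List.length_drop]
        omega
      have hget : eff[m]? = (eff.drop j)[m - j]? := by
        rw [List.getElem?_drop]
        congr 1
        omega
      have hne := hkmin (m - j) (by omega)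
      unfold Pb
      rw [hget, List.getElem?_eq_getElem hdlt,
        beq_eq_false_iff_ne.mpr (by simpa using hne), Bool.false_and]
      simp
    have hsecond : List.range' (j + k) (eff.length - j - k) = (j + k) :: List.range' (j + k + 1) (eff.length - (j + k + 1)) := by
      have h1 : eff.length - j - k = (eff.length - (j + k + 1)) + 1 := by omega
      rw [h1, List.range']
    rw [hsplit, List.find?_append, hfirst, Option.none_or, hsecond, List.find?_cons]
    by_cases hpar : ((cond inStr 1 0 + (eff.take (j + k)).count '"') % 2 == 0) = true
    · have hPb : Pb eff inStr (j + k) = true := by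
        unfold Pb
        simp [hgetjk, hpar]
      simp only [hPb, if_pos hpar]
    · have hPb : Pb eff inStr (j + k) = false := by
        unfold Pb
        simp [hgetjk]
        simpa using hpar
      simp only [hPb, if_neg hpar]
      exact ih (eff.length - (j + k + 1)) (by omega) (j + k + 1) rfl

theorem bHashLoop_eq_fh (eff : List Char) (inStr : Bool) :
    bHashLoop eff inStr 0 = fh eff inStr := by
  rw [bHashLoop_eq_find, fh_eq_find, Nat.sub_zero, ← List.range_eq_range']

theorem aScan_append_free : ∀ (eff : List Char) (tail : List Char) (i : Nat) (inStr : Bool),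
    '\\' ∉ eff →
    aScan (eff ++ tail) i inStr false =
      (match fh eff inStr with
       | some j => some (i + j)
       | none => aScan tail (i + eff.length) (inStr ^^ (eff.count '"' % 2 == 1)) false) := by
  intro eff
  induction eff with
  | nil =>
    intro tail i inStr _
    simp [fh]
  | cons c cs ih =>
    intro tail i inStr hfree
    have hcb : c ≠ '\\' := fun h => hfree (by simp [h])
    have hfree' : '\\' ∉ cs := fun h => hfree (List.mem_cons_of_mem _ h)
    rw [List.cons_append, aScan, if_neg (by simp), if_neg hcb, fh]
    by_cases hq : c = '"'
    · subst hq
      rw [if_pos rfl, if_pos rfl, ih tail (i+1) (!inStr) hfree']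
      cases hfh : fh cs (!inStr) with
      | some j => simp [Nat.add_assoc, Nat.add_comm 1 j]
      | none =>
        simp only [hfh, Option.map_none]
        congr 1
        · simp [List.length_cons]; omega
        · simp only [List.count_cons, if_pos rfl, beq_iff_eq]
          rcases Nat.mod_two_eq_zero_or_one (cs.count '"') with h | h <;>
            cases inStr <;> simp [Nat.add_mod, h]
    · rw [if_neg hq, if_neg hq]
      by_cases hh : c = '#' ∧ inStr = false
      · rw [if_pos hh, if_pos hh]
        simp
      · rw [if_neg hh, if_neg hh, ih tail (i+1) inStr hfree']
        cases hfh : fh cs inStr with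
        | some j => simp [Nat.add_assoc, Nat.add_comm 1 j]
        | none =>
          simp only [hfh, Option.map_none]
          congr 1
          · simp [List.length_cons]; omega
          · simp [List.count_cons, hq]

theorem bParts_eq_aScan : ∀ (parts : List (List Char)),
    (∀ p ∈ parts, '\\' ∉ p) →
    ∀ (isFirst : Bool) (base i : Nat) (inStr skip : Bool),
    (if isFirst then base else base + 1) = i →
    bParts parts isFirst inStr base skip = aScan (joinBS parts) i inStr skip := by
  intro parts
  induction parts with
  | nil =>
    intro _ isFirst base i inStr skip _
    simp [bParts, joinBS, aScan]
  | cons p rest ih =>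
    intro hfree isFirst base i inStr skip hbase
    have hfp : '\\' ∉ p := hfree p (List.mem_cons_self)
    have hfrest : ∀ q ∈ rest, '\\' ∉ q := fun q hq => hfree q (List.mem_cons_of_mem _ hq)
    rw [bParts]
    have hb : (if isFirst then base else base + 1) = i := hbase
    rw [hb]
    by_cases hsp : (skip = true ∧ p = [])
    · obtain ⟨hs, hp⟩ := hsp
      subst hp
      rw [if_pos ⟨hs, rfl⟩, hs]
      match rest with
      | [] => simp [bParts, joinBS, aScan]
      | q :: r =>
        rw [joinBS_cons _ (by simp), List.nil_append, aScan, if_pos rfl]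
        exact ih hfrest false i (i + 1) inStr false rfl
    · rw [if_neg hsp]
      have hjoin : joinBS (p :: rest) = p ++ (match rest with | [] => ([] : List Char) | _ :: _ => '\\' :: joinBS rest) := by
        match rest with
        | [] => simp [joinBS]
        | q :: r => rw [joinBS_cons _ (by simp)]
      rw [hjoin]
      cases hskip : skip with
      | false =>
        show (match bHashLoop p inStr 0 with
          | some h => some (i + h)
          | none => bParts rest false (inStr ^^ (p.count '"' % 2 == 1)) (i + p.length) true) = _
        rw [bHashLoop_eq_fh, aScan_append_free p _ i inStr hfp]
        cases hfh : fh p inStr with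
        | some j => rfl
        | none =>
          match rest with
          | [] => simp [bParts, aScan]
          | q :: r =>
            show bParts (q :: r) false _ (i + p.length) true = aScan ('\\' :: joinBS (q :: r)) (i + p.length) _ false
            rw [aScan, if_neg (by simp), if_pos rfl]
            exact ih hfrest false (i + p.length) (i + p.length + 1) _ true rfl
      | true =>
        have hpne : p ≠ [] := fun h => hsp ⟨hskip, h⟩
        match p, hpne with
        | c :: cs, _ =>
          show (match bHashLoop cs inStr 0 with
            | some h => some (i + 1 + h)
            | none => bParts rest false (inStr ^^ (cs.count '"' % 2 == 1)) (i + (c :: cs).length) true) = _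
          rw [List.cons_append, aScan, if_pos rfl, bHashLoop_eq_fh,
            aScan_append_free cs _ (i + 1) inStr (fun h => hfp (List.mem_cons_of_mem _ h))]
          cases hfh : fh cs inStr with
          | some j => rfl
          | none =>
            have hlen : i + (c :: cs).length = i + 1 + cs.length := by simp; omega
            rw [hlen]
            match rest with
            | [] => simp [bParts, aScan]
            | q :: r =>
              show bParts (q :: r) false _ (i + 1 + cs.length) true = aScan ('\\' :: joinBS (q :: r)) (i + 1 + cs.length) _ false
              rw [aScan, if_neg (by simp), if_pos rfl]
              exact ih hfrest false (i + 1 + cs.length) (i + 1 + cs.length + 1) _ true rfl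

theorem scan_agree (line : List Char) :
    aScan line 0 false false = bFindHash line := by
  unfold bFindHash
  rw [splitOn_bs_eq, bParts_eq_aScan (pySplitAux line []) (free_pySplitAux line [] (by simp))
    true 0 0 false false rfl, join_pySplitAux]
  simp

theorem aScan_none_no_hash : ∀ (l : List Char), '#' ∉ l → ∀ (i : Nat) (s e : Bool),
    aScan l i s e = none := by
  intro l
  induction l with
  | nil => intro _ i s e; simp [aScan]
  | cons c rest ih =>
    intro hmem i s e
    have hc : c ≠ '#' := fun h => hmem (by simp [h])
    have hr : '#' ∉ rest := fun h => hmem (List.mem_cons_of_mem _ h)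
    rw [aScan]
    split_ifs with h1 h2 h3 h4
    · exact ih hr _ _ _
    · exact ih hr _ _ _
    · exact ih hr _ _ _
    · exact absurd h4.1 hc
    · exact ih hr _ _ _

theorem line_agree (d : PySem.Dict Int String) (n : Int) (line : List Char) :
    aLine d n line = (match bCommentOf line with
      | some c => d.insert n c
      | none => d) := by
  unfold aLine bCommentOf
  by_cases h1 : PySem.Chars.startswith (PySem.Chars.strip line) ['#'] = true
  · simp [h1]
  · simp only [h1, if_false, Bool.false_eq_true]
    by_cases h2 : PySem.Chars.isIn ['#'] line = true
    · simp only [h2, if_true]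
      rw [← scan_agree line]
      match hf : aScan line 0 false false with
      | none => simp
      | some i =>
        by_cases ht : PySem.Chars.strip (line.drop (i+1)) = []
        · simp [ht]
        · simp [ht]
    · simp only [h2, if_false, Bool.false_eq_true]
      have hnm : '#' ∉ line := by
        intro hm
        exact h2 ((PySem.Chars.isIn_iff_infix _ _).mpr ((List.singleton_infix_iff _ _).mpr hm))
      rw [← scan_agree line, aScan_none_no_hash line hnm]

theorem contains_false_of_not_mem_keys {d : PySem.Dict Int String} {k : Int}
    (h : k ∉ d.items.map Prod.fst) : d.contains k = false := by
  simp only [PySem.Dict.contains, List.any_eq_false]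
  intro p hp hpk
  exact h (List.mem_map.mpr ⟨p, hp, by simpa using hpk⟩)

theorem fold_items (ps : List (Int × List Char)) :
    ∀ (d : PySem.Dict Int String),
    (∀ p ∈ ps, p.1 ∉ d.items.map Prod.fst) →
    ps.Pairwise (fun a b => a.1 ≠ b.1) →
    (ps.foldl (fun d p => aLine d p.1 p.2) d).items
      = d.items ++ ps.filterMap (fun p => (bCommentOf p.2).map (fun c => (p.1, c))) := by
  induction ps with
  | nil => intro d _ _; simp
  | cons p rest ih =>
    intro d hfresh hpw
    simp only [List.foldl_cons, List.filterMap_cons]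
    rw [line_agree]
    match hc : bCommentOf p.2 with
    | none =>
      simp only [Option.map_none]
      rw [ih d (fun q hq => hfresh q (List.mem_cons_of_mem _ hq)) (List.Pairwise.sublist (List.sublist_cons_self _ _) hpw)]
    | some c =>
      simp only [Option.map_some]
      have hcont : d.contains p.1 = false := contains_false_of_not_mem_keys (hfresh p (List.mem_cons_self))
      have hins : (d.insert p.1 c).items = d.items ++ [(p.1, c)] := by
        simp [PySem.Dict.insert, hcont]
      rw [ih (d.insert p.1 c) ?_ (List.Pairwise.sublist (List.sublist_cons_self _ _) hpw)]
      · rw [hins]; simp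
      · intro q hq
        rw [hins]
        simp only [List.map_append, List.mem_append, List.map_cons, List.map_nil,
          List.mem_singleton, not_or]
        exact ⟨hfresh q (List.mem_cons_of_mem _ hq),
          fun h => (List.pairwise_cons.mp hpw).1 q hq h.symm⟩

-- ===== VERDICT (by name: the statement is the Claim_ definition above) =====

theorem extract_comments_spec : Claim_equal_extract_comments := by
  intro fc _
  unfold Spec_extract_comments extract_comments extract_comments_alt
  have hpw := PySem.List.pairwise_lt_enumerate (xs := PySem.Chars.splitOn fc.toList ['\n']) (s := 1)
  rw [fold_items _ PySem.Dict.empty (by simp [PySem.Dict.empty]) (hpw.imp (fun h => ne_of_lt h))]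
  simp [PySem.Dict.empty]
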